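-- pv_equiv track=rewrite | github.com/CS-257-S22/B | ProductionCode/death_predictor.py | generate_seed
-- ===== SOURCE A (Python) =====
-- def generate_seed(name, date_of_birth, seed_influencer):
--     ''' Takes in the user's name and date_of_birth to create a seed number which is returned'''
--     inputs_string = name
--     seed_string = ''
--     seed_string2 = ''
--     prev = seed_influencer
--     for character in name:
--         ascii_value = ord(character)
--         rand_value = str(int(ascii_value * prev))
--         prev = ascii_value
--         seed_string += rand_value
--     for character in str(date_of_birth):
--         ascii_value = ord(character)
--         rand_value = str(int(ascii_value * prev))
--         prev = ascii_value
--         seed_string2 += rand_value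
--     seed = int(seed_string)-int(seed_string2[:len(seed_string)-1])
--     return seed
-- ===== SOURCE B (Python) =====
-- def generate_seed(name, date_of_birth, seed_influencer):
--     '''Same seed, built back-to-front: one descending indexed loop over the combined
--     string prepends each adjacent-product string into the name or date accumulator.'''
--     combined = name + str(date_of_birth)
--     name_part = ''
--     date_part = ''
--     for k in range(len(combined) - 1, -1, -1):
--         left = ord(combined[k - 1]) if k > 0 else seed_influencer
--         piece = str(ord(combined[k]) * left)
--         if k < len(name):
--             name_part = piece + name_part
--         else:
--             date_part = piece + date_part
--     return int(name_part) - int(date_part[:len(name_part) - 1])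
-- ===== Notes on version B (the rewrite author's own statement) =====
-- stated objective: alternative
-- what changed: Replaces A's two ascending loops with a carried prev and string appends by one descending indexed loop over the combined string that prepends each adjacent-product string (built back-to-front, left factor read by index, split decided per index) before the same final subtraction.
-- outside the precondition, e.g. on generate_seed('', '19', 5): A raises ValueError, B raises ValueError; on generate_seed('ab', '', 5): A raises ValueError, B raises ValueError; on generate_seed('a', '19', 0): A raises ValueError, B raises ValueError
import Mathlib
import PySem

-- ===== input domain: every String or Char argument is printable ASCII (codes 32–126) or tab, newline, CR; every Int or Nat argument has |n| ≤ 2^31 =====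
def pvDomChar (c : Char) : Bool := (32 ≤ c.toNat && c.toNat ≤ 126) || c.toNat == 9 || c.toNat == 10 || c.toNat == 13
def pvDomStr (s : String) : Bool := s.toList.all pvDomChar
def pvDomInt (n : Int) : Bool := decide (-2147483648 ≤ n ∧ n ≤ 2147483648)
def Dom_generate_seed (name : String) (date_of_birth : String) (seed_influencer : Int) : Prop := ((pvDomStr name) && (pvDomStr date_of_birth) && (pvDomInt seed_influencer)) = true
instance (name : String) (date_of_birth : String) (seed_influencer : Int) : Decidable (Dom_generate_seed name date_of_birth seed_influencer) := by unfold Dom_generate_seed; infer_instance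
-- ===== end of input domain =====

-- B builds the same seed back-to-front: one descending indexed loop over the combined
-- string, prepending each product string (alternative decomposition, same cost);
-- the equivalence is about the return value only.

-- ===== PORT A =====
-- A's two for-loops: state = (accumulated string as List Char, prev); int(ascii*prev) is
-- the identity on ints, str(int(..)) = PySem.Int.toChars; int() at the end = ofChars?
-- (none exactly where Python raises ValueError; such inputs are excluded by Pre_ below,
-- the .getD 0 is never a claimed value).
def pvStepA (st : List Char × Int) (c : Char) : List Char × Int :=
  (st.1 ++ PySem.Int.toChars ((c.toNat : Int) * st.2), (c.toNat : Int))

def generate_seed (name : String) (date_of_birth : String) (seed_influencer : Int) : Int :=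
  let r1 := name.toList.foldl pvStepA ([], seed_influencer)
  let r2 := date_of_birth.toList.foldl pvStepA ([], r1.2)
  (PySem.Int.ofChars? r1.1).getD 0 -
    (PySem.Int.ofChars? (PySem.List.slice r2.1 none (some ((r1.1.length : Int) - 1)))).getD 0

-- ===== PORT B =====
-- Source B's loop body: at index k the left factor is combined[k-1] (seed_influencer at k=0)
-- and the product string is prepended to the name or date accumulator.
def pvStepB (combined : List Char) (m : Int) (seed_influencer : Int)
    (st : List Char × List Char) (k : Int) : List Char × List Char :=
  let left : Int := if 0 < k then ((PySem.List.pyGetD combined (k - 1) ' ').toNat : Int) else seed_influencer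
  let piece := PySem.Int.toChars (((PySem.List.pyGetD combined k ' ').toNat : Int) * left)
  if k < m then (piece ++ st.1, st.2) else (st.1, piece ++ st.2)

def generate_seed_alt (name : String) (date_of_birth : String) (seed_influencer : Int) : Int :=
  let combined := name.toList ++ date_of_birth.toList
  let res := (PySem.List.pyRange ((combined.length : Int) - 1) (-1) (-1)).foldl
    (pvStepB combined (name.toList.length : Int) seed_influencer) ([], [])
  (PySem.Int.ofChars? res.1).getD 0 -
    (PySem.Int.ofChars? (PySem.List.slice res.2 none (some ((res.1.length : Int) - 1)))).getD 0

-- ===== PRECONDITION & SPEC =====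
-- Pre_ excludes exactly the inputs on which Python A raises ValueError from int(''):
-- empty name, empty date_of_birth, or a one-character name whose first product
-- ord(name[0])*seed_influencer is a single digit 0..9 (then the date slice is empty).
-- B raises there too.
def Pre_generate_seed (name : String) (date_of_birth : String) (seed_influencer : Int) : Prop :=
  name.toList ≠ [] ∧ date_of_birth.toList ≠ [] ∧
    ¬ (name.toList.length = 1 ∧ 0 ≤ ((name.toList.headD ' ').toNat : Int) * seed_influencer ∧
        ((name.toList.headD ' ').toNat : Int) * seed_influencer ≤ 9)
instance (name : String) (date_of_birth : String) (seed_influencer : Int) : Decidable (Pre_generate_seed name date_of_birth seed_influencer) := by unfold Pre_generate_seed; infer_instance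

def pvWitness_generate_seed : String × String × Int := ("ab", "19", 5)

def Spec_generate_seed (name : String) (date_of_birth : String) (seed_influencer : Int) (out : Int) : Prop := out = generate_seed_alt name date_of_birth seed_influencer
instance (name : String) (date_of_birth : String) (seed_influencer : Int) (out : Int) : Decidable (Spec_generate_seed name date_of_birth seed_influencer out) := by unfold Spec_generate_seed; infer_instance

-- ===== CLAIM (what is proved, stated in full; the proofs are below) =====
def Claim_equal_generate_seed : Prop := ∀ (name : String) (date_of_birth : String) (seed_influencer : Int), Dom_generate_seed name date_of_birth seed_influencer → Pre_generate_seed name date_of_birth seed_influencer → Spec_generate_seed name date_of_birth seed_influencer (generate_seed name date_of_birth seed_influencer)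

-- ===== LEMMAS AND PROOFS =====

-- the adjacent-product string list, with carried previous value p
def pvProds (p : Int) : List Char → List (List Char)
  | [] => []
  | c :: cs => PySem.Int.toChars ((c.toNat : Int) * p) :: pvProds (c.toNat : Int) cs

-- the carry after consuming a list (A's prev)
def pvLast (p : Int) : List Char → Int
  | [] => p
  | c :: cs => pvLast (c.toNat : Int) cs

theorem pvFoldA (l : List Char) : ∀ (p : Int) (acc : List Char),
    l.foldl pvStepA (acc, p) = (acc ++ (pvProds p l).flatten, pvLast p l) := by
  induction l with
  | nil => intro p acc; simp [pvProds, pvLast]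
  | cons c cs ih =>
    intro p acc
    simp only [List.foldl_cons, pvStepA, pvProds, pvLast, ih, List.flatten_cons, List.append_assoc]

theorem pvProds_append (l₁ l₂ : List Char) : ∀ p : Int,
    pvProds p (l₁ ++ l₂) = pvProds p l₁ ++ pvProds (pvLast p l₁) l₂ := by
  induction l₁ with
  | nil => intro p; simp [pvProds, pvLast]
  | cons c cs ih => intro p; simp [pvProds, pvLast, ih]

theorem pvLast_append (l₁ l₂ : List Char) : ∀ p : Int,
    pvLast p (l₁ ++ l₂) = pvLast (pvLast p l₁) l₂ := by
  induction l₁ with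
  | nil => intro p; simp [pvLast]
  | cons c cs ih => intro p; simp [pvLast, ih]

theorem pvLast_getLast (l : List Char) (h : l ≠ []) : ∀ p : Int,
    pvLast p l = ((l.getLast h).toNat : Int) := by
  induction l with
  | nil => exact absurd rfl h
  | cons c cs ih =>
    intro p
    cases cs with
    | nil => simp [pvLast]
    | cons d ds =>
      have h1 : pvLast p (c :: d :: ds) = pvLast ((c.toNat : Int)) (d :: ds) := rfl
      rw [h1, ih (by simp)]
      simp [List.getLast_cons]

-- B's "left" factor at the top index of l equals A's carry pvLast, read through any
-- extension of the combined list
theorem pvLeft_eq_pvLast (l rest : List Char) (si : Int) :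
    (if 0 < (l.length : Int) then
        ((PySem.List.pyGetD (l ++ rest) ((l.length : Int) - 1) ' ').toNat : Int)
      else si) = pvLast si l := by
  cases l with
  | nil => simp [pvLast]
  | cons c cs =>
    have hpos : 0 < ((c :: cs).length : Int) := by simp
    rw [if_pos hpos]
    have hcast : ((c :: cs).length : Int) - 1 = (((c :: cs).length - 1 : Nat) : Int) := by
      push_cast [List.length_cons]; omega
    rw [hcast, PySem.List.pyGetD_natCast]
    have hlt : (c :: cs).length - 1 < (c :: cs).length := by simp
    rw [List.getD_append _ _ _ _ (by omega), List.getD_eq_getElem _ _ hlt,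
      pvLast_getLast (c :: cs) (by simp) si, List.getLast_eq_getElem]

-- pvStepB only reads combined below the top index, so trailing characters are irrelevant
theorem pvStepB_append (l : List Char) (c : Char) (m si : Int)
    (st : List Char × List Char) (k : Int) (h0 : 0 ≤ k) (h1 : k < (l.length : Int)) :
    pvStepB (l ++ [c]) m si st k = pvStepB l m si st k := by
  obtain ⟨j, rfl⟩ : ∃ j : Nat, k = (j : Int) := ⟨k.toNat, (Int.toNat_of_nonneg h0).symm⟩
  have hj : j < l.length := by exact_mod_cast h1
  unfold pvStepB
  rcases Nat.eq_zero_or_pos j with hj0 | hj0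
  · subst hj0
    simp only [PySem.List.pyGetD_natCast, List.getD_append _ _ _ _ hj]
    norm_num
  · have hk1 : ((j : Int)) - 1 = ((j - 1 : Nat) : Int) := by omega
    simp only [hk1, PySem.List.pyGetD_natCast,
      List.getD_append _ _ _ _ hj, List.getD_append _ _ _ _ (by omega : j - 1 < l.length)]

-- the accumulators only grow at the front: the initial state factors out as a suffix
theorem pvFoldB_shift (cs : List Char) (m si : Int) (ks : List Int) : ∀ (x y : List Char),
    ks.foldl (pvStepB cs m si) (x, y) =
      ((ks.foldl (pvStepB cs m si) ([], [])).1 ++ x, (ks.foldl (pvStepB cs m si) ([], [])).2 ++ y) := by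
  induction ks with
  | nil => intro x y; simp
  | cons k ks ih =>
    intro x y
    simp only [List.foldl_cons, pvStepB]
    set piece := PySem.Int.toChars (((PySem.List.pyGetD cs k ' ').toNat : Int) *
      (if 0 < k then ((PySem.List.pyGetD cs (k - 1) ' ').toNat : Int) else si)) with hp
    by_cases hk : k < m
    · simp only [if_pos hk, List.append_nil]
      rw [ih (piece ++ x) y, ih piece []]
      simp [List.append_assoc]
    · simp only [if_neg hk, List.append_nil]
      rw [ih x (piece ++ y), ih [] piece]
      simp [List.append_assoc]

-- B's descending loop over the name alone produces A's name string
theorem pvStepB_m_congr (cs : List Char) (m m' si : Int) (st : List Char × List Char)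
    (k : Int) (h : k < m ↔ k < m') : pvStepB cs m si st k = pvStepB cs m' si st k := by
  simp only [pvStepB]
  by_cases hk : k < m
  · rw [if_pos hk, if_pos (h.mp hk)]
  · rw [if_neg hk, if_neg (fun hc => hk (h.mpr hc))]

theorem pvFoldB_name (ncs : List Char) (si : Int) :
    (PySem.List.pyRange ((ncs.length : Int) - 1) (-1) (-1)).foldl
        (pvStepB ncs (ncs.length : Int) si) ([], [])
      = ((pvProds si ncs).flatten, []) := by
  induction ncs using List.reverseRecOn with
  | nil => rw [PySem.List.pyRange_neg_one_eq_nil (by simp)]; simp [pvProds]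
  | append_singleton l c ih =>
    have hm : (((l ++ [c]).length : Int)) = (l.length : Int) + 1 := by simp
    rw [hm, show (l.length : Int) + 1 - 1 = (l.length : Int) by ring,
      PySem.List.pyRange_neg_one_cons (by omega), List.foldl_cons]
    have hstep : pvStepB (l ++ [c]) ((l.length : Int) + 1) si ([], []) (l.length : Int)
        = (PySem.Int.toChars ((c.toNat : Int) * pvLast si l), []) := by
      simp only [pvStepB]
      rw [if_pos (by omega)]
      have hget : PySem.List.pyGetD (l ++ [c]) ((l.length : Int)) ' ' = c := by
        rw [PySem.List.pyGetD_natCast]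
        simp [List.getD_eq_getElem?_getD]
      rw [hget, pvLeft_eq_pvLast l [c] si]
      simp
    rw [hstep]
    have hcongr : ∀ (st : List Char × List Char), ∀ k ∈ PySem.List.pyRange ((l.length : Int) - 1) (-1) (-1),
        pvStepB (l ++ [c]) ((l.length : Int) + 1) si st k = pvStepB l (l.length : Int) si st k := by
      intro st k hk
      rw [PySem.List.mem_pyRange_neg_one] at hk
      rw [pvStepB_append l c _ si st k (by omega) (by omega)]
      exact pvStepB_m_congr l _ _ si st k (by omega)
    rw [PySem.List.foldl_congr_mem _ _ _ _ hcongr, pvFoldB_shift, ih]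
    simp [pvProds_append l [c] si, pvProds]

-- B's descending loop over the combined list produces A's two strings
theorem pvFoldB_main (dcs ncs : List Char) (si : Int) :
    (PySem.List.pyRange (((ncs ++ dcs).length : Int) - 1) (-1) (-1)).foldl
        (pvStepB (ncs ++ dcs) (ncs.length : Int) si) ([], [])
      = ((pvProds si ncs).flatten, (pvProds (pvLast si ncs) dcs).flatten) := by
  induction dcs using List.reverseRecOn with
  | nil => simpa [pvProds] using pvFoldB_name ncs si
  | append_singleton d c ih =>
    rw [show ncs ++ (d ++ [c]) = (ncs ++ d) ++ [c] by simp]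
    have hm : ((((ncs ++ d) ++ [c]).length : Int)) = ((ncs ++ d).length : Int) + 1 := by
      simp only [List.length_append, List.length_cons, List.length_nil]; push_cast; ring
    rw [hm, show ((ncs ++ d).length : Int) + 1 - 1 = ((ncs ++ d).length : Int) by ring,
      PySem.List.pyRange_neg_one_cons (by omega), List.foldl_cons]
    have hne : ¬ ((((ncs ++ d)).length : Int) < (ncs.length : Int)) := by
      simp only [List.length_append]; push_cast; omega
    have hstep : pvStepB ((ncs ++ d) ++ [c]) (ncs.length : Int) si ([], []) (((ncs ++ d)).length : Int)
        = ([], PySem.Int.toChars ((c.toNat : Int) * pvLast (pvLast si ncs) d)) := by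
      simp only [pvStepB]
      rw [if_neg hne]
      have hget : PySem.List.pyGetD ((ncs ++ d) ++ [c]) (((ncs ++ d).length : Int)) ' ' = c := by
        rw [PySem.List.pyGetD_natCast]
        simp [List.getD_eq_getElem?_getD]
      rw [hget, pvLeft_eq_pvLast (ncs ++ d) [c] si, pvLast_append]
      simp
    rw [hstep]
    have hcongr : ∀ (st : List Char × List Char), ∀ k ∈ PySem.List.pyRange (((ncs ++ d).length : Int) - 1) (-1) (-1),
        pvStepB ((ncs ++ d) ++ [c]) (ncs.length : Int) si st k = pvStepB (ncs ++ d) (ncs.length : Int) si st k := by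
      intro st k hk
      rw [PySem.List.mem_pyRange_neg_one] at hk
      exact pvStepB_append (ncs ++ d) c _ si st k (by omega) (by omega)
    rw [PySem.List.foldl_congr_mem _ _ _ _ hcongr, pvFoldB_shift, ih]
    simp [pvProds_append d [c] (pvLast si ncs), pvProds]

theorem generate_seed_eq (name date_of_birth : String) (seed_influencer : Int) :
    generate_seed name date_of_birth seed_influencer = generate_seed_alt name date_of_birth seed_influencer := by
  unfold generate_seed generate_seed_alt
  simp only [pvFoldA, List.nil_append, pvFoldB_main]

-- ===== VERDICT (by name: the statement is the Claim_ definition above) =====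
theorem generate_seed_spec : Claim_equal_generate_seed := by
  intro name dob si _ _
  exact generate_seed_eq name dob si
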